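-- pv_equiv track=rewrite | github.com/sezonovdanylo/Proga2024 | OOP/12.04.2024/t01.py | stepen
-- ===== SOURCE A (Python) =====
-- def stepen(x):
--     x0= "1"
--     a = 1
--     while True:
--         a = a*10
--         x0 = x0+str(a)
--         if len(x0)>x:
--             break
--     return(x0[x-1], x0)
-- ===== SOURCE B (Python) =====
-- def stepen(x):
--     # number of terms n = smallest n >= 2 with n*(n+1)//2 > x  (term i is str(10**i) = "1"+"0"*i, length i+1)
--     n = 2
--     while n * (n + 1) // 2 <= x:
--         n += 1
--     s = "".join("1" + "0" * i for i in range(n))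
--     return (s[x - 1], s)
-- ===== Notes on version B (the rewrite author's own statement) =====
-- stated objective: faster
-- what changed: Instead of growing the string incrementally (x0 = x0 + str(a), re-checking len each iteration) with big-int multiplications and str() calls, B counts the number of terms first via the triangular-number length identity n(n+1)/2 and then builds the whole string in one join of '1'+'0'*i terms, with no big-int arithmetic at all.
import Mathlib
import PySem

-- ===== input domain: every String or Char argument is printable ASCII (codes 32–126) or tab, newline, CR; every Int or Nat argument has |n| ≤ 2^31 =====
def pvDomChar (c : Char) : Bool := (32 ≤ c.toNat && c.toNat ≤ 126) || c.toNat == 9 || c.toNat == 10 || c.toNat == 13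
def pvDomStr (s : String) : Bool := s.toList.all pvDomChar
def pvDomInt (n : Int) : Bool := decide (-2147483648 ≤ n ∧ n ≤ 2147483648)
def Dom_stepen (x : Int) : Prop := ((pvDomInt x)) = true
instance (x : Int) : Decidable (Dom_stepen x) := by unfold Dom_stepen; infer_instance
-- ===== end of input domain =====

-- B replaces A's incremental concatenate-and-recheck loop by counting the terms first
-- (triangular-number length identity) and building the string once; objective: alternative.

-- decreasing-measure fact for A's loop (cited by name in decreasing_by to keep the term small)
theorem loopA_dec (x : Int) (x0 l : List Char) (hl : 0 < l.length)
    (h : ¬ (((x0 ++ l).length : Int) > x)) :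
    (x + 1 - ((x0 ++ l).length : Int)).toNat < (x + 1 - (x0.length : Int)).toNat := by
  rw [List.length_append] at *
  omega

-- decreasing-measure fact for B's counting loop (cited by name in decreasing_by)
theorem findN_dec (x : Int) (n : Nat) (h : ((n * (n + 1) / 2 : Nat) : Int) ≤ x) :
    (x + 1 - ((n + 1 : Nat) : Int)).toNat < (x + 1 - (n : Int)).toNat := by
  have hn : n ≤ n * (n + 1) / 2 := by
    rcases Nat.eq_zero_or_pos n with h0 | h0
    · simp [h0]
    · exact Nat.le_div_iff_mul_le (by omega) |>.mpr (Nat.mul_le_mul_left n (by omega))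
  have hn' : (n : Int) ≤ ((n * (n + 1) / 2 : Nat) : Int) := by exact_mod_cast hn
  have hx : (n : Int) ≤ x := le_trans hn' h
  omega

-- str(n) is never empty (needed for the termination of A's loop)
theorem toDigitsCore_length_pos (b f n : Nat) (acc : List Char) (hf : 0 < f) :
    acc.length < (Nat.toDigitsCore b f n acc).length := by
  induction f generalizing n acc with
  | zero => omega
  | succ f ih =>
    simp only [Nat.toDigitsCore]
    split
    · simp
    · cases f with
      | zero => simp [Nat.toDigitsCore]
      | succ f =>
        have := ih (n / b) (Nat.digitChar (n % b) :: acc) (by omega)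
        simp at this; omega

theorem toChars_length_pos (n : Int) : 0 < (PySem.Int.toChars n).length := by
  unfold PySem.Int.toChars
  split
  · simp
  · simpa [Nat.toDigits] using toDigitsCore_length_pos 10 (n.toNat + 1) n.toNat [] (by omega)

-- ===== PORT A =====
-- the while-True loop: a = a*10; x0 = x0 + str(a); break when len(x0) > x
-- (strings are carried as List Char and wrapped with String.ofList at the end — exact on code points)
def stepenLoopA (x : Int) (a : Int) (x0 : List Char) : List Char :=
  let a' := a * 10
  let x0' := x0 ++ PySem.Int.toChars a'
  if h : ((x0'.length : Int)) > x then x0' else stepenLoopA x a' x0'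
termination_by (x + 1 - (x0.length : Int)).toNat
decreasing_by
  exact loopA_dec x x0 (PySem.Int.toChars (a * 10)) (toChars_length_pos _) h

def stepen (x : Int) : String × String :=
  let x0 := stepenLoopA x 1 ['1']
  ((match PySem.List.pyGet? x0 (x - 1) with
    | some c => String.ofList [c]
    | none => ""), String.ofList x0)

-- ===== PORT B =====
-- the Python term "1" + "0"*i
def termB (i : Nat) : List Char := '1' :: List.replicate i '0'

-- while n*(n+1)//2 <= x: n += 1
def findN (x : Int) (n : Nat) : Nat :=
  if ((n * (n + 1) / 2 : Nat) : Int) ≤ x then findN x (n + 1) else n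
termination_by (x + 1 - (n : Int)).toNat
decreasing_by
  rename_i h
  exact findN_dec x n h

-- "".join("1" + "0"*i for i in range(n))
def buildS (n : Nat) : List Char := PySem.Chars.join [] ((List.range n).map termB)

def stepen_alt (x : Int) : String × String :=
  let n := findN x 2
  let s := buildS n
  ((match PySem.List.pyGet? s (x - 1) with
    | some c => String.ofList [c]
    | none => ""), String.ofList s)

-- ===== PRECONDITION & SPEC =====
-- Pre_ excludes exactly x ≤ -3, where Python A raises IndexError on x0[x-1] (B raises there too).
def Pre_stepen (x : Int) : Prop := -2 ≤ x
instance (x : Int) : Decidable (Pre_stepen x) := by unfold Pre_stepen; infer_instance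
def pvWitness_stepen : Int := (5)

def Spec_stepen (x : Int) (out : String × String) : Prop := out = stepen_alt x
instance (x : Int) (out : String × String) : Decidable (Spec_stepen x out) := by unfold Spec_stepen; infer_instance

-- ===== CLAIM (what is proved, stated in full; the proofs are below) =====
def Claim_equal_stepen : Prop := ∀ (x : Int), Dom_stepen x → Pre_stepen x → Spec_stepen x (stepen x)

-- ===== LEMMAS AND PROOFS =====

theorem join_nil_flatten (l : List (List Char)) : PySem.Chars.join [] l = l.flatten := by
  show List.intercalate [] l = l.flatten
  induction l with
  | nil => rfl
  | cons a t ih =>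
    cases t with
    | nil => simp [List.intercalate]
    | cons b u => simp_all [List.intercalate, List.intersperse]

theorem buildS_succ (n : Nat) : buildS (n + 1) = buildS n ++ termB n := by
  simp [buildS, join_nil_flatten, List.range_succ]

-- str(10^i) = "1" + "0"*i
theorem toDigitsCore_pow10 (i : Nat) : ∀ (f : Nat) (acc : List Char), i < f →
    Nat.toDigitsCore 10 f (10 ^ i) acc = '1' :: (List.replicate i '0' ++ acc) := by
  induction i with
  | zero =>
    intro f acc hf
    cases f with
    | zero => omega
    | succ f => simp [Nat.toDigitsCore]; decide
  | succ i ih =>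
    intro f acc hf
    cases f with
    | zero => omega
    | succ f =>
      have hdiv : 10 ^ (i + 1) / 10 = 10 ^ i := by
        rw [pow_succ]; exact Nat.mul_div_cancel _ (by omega)
      have hmod : 10 ^ (i + 1) % 10 = 0 := by
        rw [pow_succ]; exact Nat.mul_mod_left _ _
      simp only [Nat.toDigitsCore, hdiv, hmod]
      rw [ih f _ (by omega)]
      have h0 : Nat.digitChar 0 = '0' := by decide
      simp [List.replicate_succ', h0]

theorem toChars_pow10 (i : Nat) : PySem.Int.toChars ((10 : Int) ^ i) = termB i := by
  have hlt : ¬ ((10 : Int) ^ i < 0) := not_lt.mpr (by positivity)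
  have hcast : ((10 : Int) ^ i).toNat = 10 ^ i := by
    have : ((10 : Int) ^ i) = ((10 ^ i : Nat) : Int) := by push_cast; ring
    rw [this, Int.toNat_natCast]
  simp only [PySem.Int.toChars, hlt, if_false, hcast, Nat.toDigits]
  rw [toDigitsCore_pow10 i (10 ^ i + 1) [] (by have := Nat.lt_pow_self (by omega : 1 < 10) (n := i); omega)]
  simp [termB]

theorem buildS_length (n : Nat) : 2 * (buildS n).length = n * (n + 1) := by
  induction n with
  | zero => rfl
  | succ n ih =>
    rw [buildS_succ]
    simp only [List.length_append, termB, List.length_cons, List.length_replicate]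
    ring_nf
    ring_nf at ih
    omega

theorem buildS_length_tri (n : Nat) : (buildS n).length = n * (n + 1) / 2 := by
  have := buildS_length n; omega

-- A's loop, entered with a = 10^(k-1) and x0 = buildS k, runs one iteration as follows
theorem loopA_step (x : Int) (k : Nat) (hk : 1 ≤ k) :
    stepenLoopA x ((10 : Int) ^ (k - 1)) (buildS k) =
      if ((buildS (k + 1)).length : Int) > x then buildS (k + 1)
      else stepenLoopA x ((10 : Int) ^ k) (buildS (k + 1)) := by
  conv_lhs => rw [stepenLoopA.eq_def]
  have hpow : (10 : Int) ^ (k - 1) * 10 = 10 ^ k := by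
    conv_rhs => rw [show k = (k - 1) + 1 by omega]
    rw [pow_succ]
  simp only [hpow, toChars_pow10, ← buildS_succ, dite_eq_ite]

theorem tri_cast_gt (k : Nat) (x : Int) :
    (((buildS (k + 1)).length : Int) > x) ↔ ¬ ((((k + 1) * ((k + 1) + 1) / 2 : Nat) : Int) ≤ x) := by
  rw [buildS_length_tri]
  omega

-- A's loop produces exactly buildS (findN x (k+1))
theorem loop_eq (x : Int) : ∀ (m k : Nat), 1 ≤ k → (x + 1 - (k : Int)).toNat ≤ m →
    stepenLoopA x ((10 : Int) ^ (k - 1)) (buildS k) = buildS (findN x (k + 1)) := by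
  intro m
  induction m with
  | zero =>
    intro k hk hm
    rw [loopA_step x k hk]
    conv_rhs => rw [findN.eq_def]
    have hgt : ((buildS (k + 1)).length : Int) > x := by
      rw [buildS_length_tri]
      have h1 : k + 1 ≤ (k + 1) * (k + 1 + 1) / 2 :=
        Nat.le_div_iff_mul_le (by omega) |>.mpr (Nat.mul_le_mul_left (k + 1) (by omega))
      have h2 : ((k + 1 : Nat) : Int) ≤ (((k + 1) * (k + 1 + 1) / 2 : Nat) : Int) := by
        exact_mod_cast h1
      push_cast at h2 ⊢
      omega
    rw [if_pos hgt, if_neg ((tri_cast_gt k x).mp hgt)]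
  | succ m ih =>
    intro k hk hm
    rw [loopA_step x k hk]
    conv_rhs => rw [findN.eq_def]
    by_cases hc : (((k + 1) * ((k + 1) + 1) / 2 : Nat) : Int) ≤ x
    · rw [if_neg (fun hgt => (tri_cast_gt k x).mp hgt hc), if_pos hc]
      have h1 : k + 1 ≤ (k + 1) * ((k + 1) + 1) / 2 :=
        Nat.le_div_iff_mul_le (by omega) |>.mpr (Nat.mul_le_mul_left (k + 1) (by omega))
      have h2 : ((k + 1 : Nat) : Int) ≤ x :=
        le_trans (by exact_mod_cast h1) hc
      have := ih (k + 1) (by omega) (by push_cast at h2 ⊢; omega)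
      simpa using this
    · rw [if_pos ((tri_cast_gt k x).mpr hc), if_neg hc]

theorem stepen_eq_alt (x : Int) : stepen x = stepen_alt x := by
  unfold stepen stepen_alt
  have h0 : stepenLoopA x 1 ['1'] = buildS (findN x 2) := by
    have := loop_eq x (x + 1 - (1 : Int)).toNat 1 (by omega) (by omega)
    simpa [buildS, PySem.Chars.join, List.intercalate, termB, List.range_succ] using this
  rw [h0]

-- ===== VERDICT (by name: the statement is the Claim_ definition above) =====
theorem stepen_spec : Claim_equal_stepen := by
  intro x _ _
  unfold Spec_stepen
  exact stepen_eq_alt x
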